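-- pv_equiv track=rewrite | github.com/eliot127825-rgb/AffectOmni_nobody | scripts/insert_timestamps.py | _insert_at_anchor
-- ===== SOURCE A (Python) =====
-- def _insert_at_anchor(
--     text: str,
--     anchor: str,
--     timestamp_str: str,
--     inserted_positions: set
-- ) -> str:
--     """
--     在指定 anchor 位置插入时间戳
--
--     处理同一 anchor 多次出现的情况：
--         - 使用"第一次未插入的位置"
--
--     Returns:
--         插入后的文本，如果找不到 anchor 则返回 None
--     """
--     # 不区分大小写查找
--     anchor_lower = anchor.lower()
--     text_lower = text.lower()
--
--     # 查找所有匹配位置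
--     positions = []
--     start = 0
--     while True:
--         pos = text_lower.find(anchor_lower, start)
--         if pos == -1:
--             break
--         positions.append(pos)
--         start = pos + 1
--
--     if not positions:
--         return None
--
--     # 找到第一个未插入的位置
--     for pos in positions:
--         if pos not in inserted_positions:
--             # 插入时间戳（在 anchor 后）
--             insert_pos = pos + len(anchor)
--             result = text[:insert_pos] + timestamp_str + text[insert_pos:]
--
--             # 标记已插入
--             inserted_positions.add(pos)
--             return result
--
--     # 所有位置都已插入
--     return None
-- ===== SOURCE B (Python) =====
-- def _insert_at_anchor(
--     text: str,
--     anchor: str,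
--     timestamp_str: str,
--     inserted_positions: set
-- ) -> str:
--     """Single index scan: first unused occurrence found directly, no positions list."""
--     text_lower = text.lower()
--     anchor_lower = anchor.lower()
--     n = len(anchor)
--     for i in range(len(text) - n + 1):
--         if text_lower[i:i + n] == anchor_lower and i not in inserted_positions:
--             inserted_positions.add(i)
--             cut = i + n
--             return text[:cut] + timestamp_str + text[cut:]
--     return None
-- ===== Notes on version B (the rewrite author's own statement) =====
-- stated objective: simpler
-- what changed: A first collects every case-insensitive find() occurrence into a positions list and then scans that list for the first position not yet in inserted_positions; B is a single index scan over range(len(text)-len(anchor)+1) that tests match-and-unused at each position directly, building no positions list.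
import Mathlib
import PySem

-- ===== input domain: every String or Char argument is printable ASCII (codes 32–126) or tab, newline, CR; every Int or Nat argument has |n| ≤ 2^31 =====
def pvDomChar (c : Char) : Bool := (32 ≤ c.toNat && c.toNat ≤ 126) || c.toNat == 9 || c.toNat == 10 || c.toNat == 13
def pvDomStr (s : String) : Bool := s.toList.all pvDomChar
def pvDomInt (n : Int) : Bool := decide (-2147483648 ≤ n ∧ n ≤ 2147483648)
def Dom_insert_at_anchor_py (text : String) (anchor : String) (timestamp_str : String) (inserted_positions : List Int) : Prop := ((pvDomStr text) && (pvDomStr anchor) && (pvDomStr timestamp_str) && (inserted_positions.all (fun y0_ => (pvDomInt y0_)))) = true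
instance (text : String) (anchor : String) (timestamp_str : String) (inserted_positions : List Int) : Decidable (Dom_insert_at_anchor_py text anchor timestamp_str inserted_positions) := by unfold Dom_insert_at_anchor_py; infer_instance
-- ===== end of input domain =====

-- B replaces A's two sequential loops (collect all occurrences, then scan them) by one direct index scan;
-- objective: simpler. Equivalence is about the RETURN value only: both Pythons also add the chosen position
-- to the caller's inserted_positions set (the same mutation in both).

-- ===== PORT A =====
-- A raises on no input: both ports are total.

-- findFrom with a start past the end of the string is -1 (CPython quirk, kept by PySem).
theorem pv_findFrom_of_gt (s sub : List Char) (start : Nat) (h : s.length < start) :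
    PySem.Chars.findFrom s sub (start : Int) none = -1 := by
  unfold PySem.Chars.findFrom
  have h1 : ¬ ((start : Int) < 0) := by omega
  simp only [h1, if_false]
  rw [if_pos (by exact_mod_cast h)]

-- a non-(-1) result of findFrom lies in [start, s.length]  (used by pvCollect's decreasing_by)
theorem pv_findFrom_bounds (s sub : List Char) (start : Nat)
    (h : PySem.Chars.findFrom s sub (start : Int) none ≠ -1) :
    (start : Int) ≤ PySem.Chars.findFrom s sub (start : Int) none ∧
      PySem.Chars.findFrom s sub (start : Int) none ≤ (s.length : Int) := by
  by_cases hs : start ≤ s.length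
  · refine ⟨(PySem.Chars.findFrom_natCast_spec s sub start hs h).1, ?_⟩
    rw [PySem.Chars.findFrom_natCast s sub start hs] at h ⊢
    split at h
    · exact absurd rfl h
    · rename_i hne
      split
      · omega
      · have hle := PySem.Chars.find_le_length (s.drop start) sub
        simp only [List.length_drop] at hle
        omega
  · exact absurd (pv_findFrom_of_gt s sub start (by omega)) h
def pvCollect (tl al : List Char) (start : Nat) : List Int :=
  let p := PySem.Chars.findFrom tl al (start : Int) none
  if h : p = -1 then []
  else p :: pvCollect tl al (p.toNat + 1)
termination_by tl.length + 1 - start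
decreasing_by
  have hb := pv_findFrom_bounds tl al start h
  omega

-- A's first while-loop: collect all (overlapping) match positions via repeated find(_, start)


-- A's second loop: first position not in inserted_positions, insert timestamp after the anchor there
def pvLoopA (text : List Char) (n : Nat) (ts : List Char) (inserted : List Int) :
    List Int → Option String
  | [] => none
  | pos :: rest =>
    if inserted.contains pos = false then
      let insertPos : Int := pos + (n : Int)
      some (String.ofList (PySem.List.slice text none (some insertPos) ++ ts ++
        PySem.List.slice text (some insertPos) none))
    else pvLoopA text n ts inserted rest

def insert_at_anchor_py (text : String) (anchor : String) (timestamp_str : String) (inserted_positions : List Int) : Option String :=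
  let anchor_lower := PySem.Chars.lower anchor.toList
  let text_lower := PySem.Chars.lower text.toList
  let positions := pvCollect text_lower anchor_lower 0
  if positions = [] then none
  else pvLoopA text.toList anchor.toList.length timestamp_str.toList inserted_positions positions

-- ===== PORT B =====
-- B's single loop over range(len(text) - n + 1): match test and unused test fused
def pvLoopB (text tl al : List Char) (n : Nat) (ts : List Char) (inserted : List Int) :
    List Int → Option String
  | [] => none
  | i :: rest =>
    if (PySem.List.slice tl (some i) (some (i + (n : Int))) == al) && !(inserted.contains i) then
      let cut : Int := i + (n : Int)
      some (String.ofList (PySem.List.slice text none (some cut) ++ ts ++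
        PySem.List.slice text (some cut) none))
    else pvLoopB text tl al n ts inserted rest

def insert_at_anchor_py_alt (text : String) (anchor : String) (timestamp_str : String) (inserted_positions : List Int) : Option String :=
  let text_lower := PySem.Chars.lower text.toList
  let anchor_lower := PySem.Chars.lower anchor.toList
  let n := anchor.toList.length
  pvLoopB text.toList text_lower anchor_lower n timestamp_str.toList inserted_positions
    (PySem.List.pyRange 0 ((text.toList.length : Int) - (n : Int) + 1) 1)

-- ===== PRECONDITION & SPEC =====
def Spec_insert_at_anchor_py (text : String) (anchor : String) (timestamp_str : String) (inserted_positions : List Int) (out : Option String) : Prop := out = insert_at_anchor_py_alt text anchor timestamp_str inserted_positions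
instance (text : String) (anchor : String) (timestamp_str : String) (inserted_positions : List Int) (out : Option String) : Decidable (Spec_insert_at_anchor_py text anchor timestamp_str inserted_positions out) := by unfold Spec_insert_at_anchor_py; infer_instance

-- ===== CLAIM (what is proved, stated in full; the proofs are below) =====
def Claim_equal_insert_at_anchor_py : Prop := ∀ (text : String) (anchor : String) (timestamp_str : String) (inserted_positions : List Int), Dom_insert_at_anchor_py text anchor timestamp_str inserted_positions → Spec_insert_at_anchor_py text anchor timestamp_str inserted_positions (insert_at_anchor_py text anchor timestamp_str inserted_positions)

-- ===== LEMMAS AND PROOFS =====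

-- pvCollect start = the positions in [start, |tl|] whose suffix starts with al
theorem pvCollect_spec (tl al : List Char) (start : Nat) : start ≤ tl.length + 1 →
    pvCollect tl al start =
      (PySem.List.pyRange (start : Int) ((tl.length : Int) + 1) 1).filter
        (fun i => decide (al <+: tl.drop i.toNat)) := by
  induction start using pvCollect.induct (tl := tl) (al := al)
  case case1 start p hp =>
    intro hs
    have hp' : PySem.Chars.findFrom tl al (start : Int) none = -1 := hp
    rw [pvCollect.eq_def, dif_pos hp']
    symm
    rw [List.filter_eq_nil_iff]
    intro i hi
    rw [PySem.List.mem_pyRange_one] at hi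
    simp only [decide_eq_true_eq]
    intro hpre
    by_cases hlen : start ≤ tl.length
    · rw [PySem.Chars.findFrom_natCast_eq_neg_one_iff tl al start hlen] at hp'
      apply hp'
      have h0 : (0 : Int) ≤ i := le_trans (by exact_mod_cast Nat.zero_le start) hi.1
      have hd : tl.drop i.toNat = (tl.drop start).drop (i.toNat - start) := by
        rw [List.drop_drop]
        congr 1
        omega
      rw [hd] at hpre
      exact hpre.isInfix.trans (List.drop_suffix _ _).isInfix
    · have h1 := hi.1
      have h2 := hi.2
      omega
  case case2 start p hp ih =>
    intro hs
    have hp' : PySem.Chars.findFrom tl al (start : Int) none ≠ -1 := hp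
    rw [pvCollect.eq_def, dif_neg hp']
    have hlen : start ≤ tl.length := by
      by_contra hgt
      exact hp' (pv_findFrom_of_gt tl al start (by omega))
    have hb := pv_findFrom_bounds tl al start hp'
    obtain ⟨hpre, hmin⟩ := (PySem.Chars.findFrom_natCast_spec tl al start hlen hp').2
    set q := PySem.Chars.findFrom tl al (start : Int) none with hq
    have h0 : (0 : Int) ≤ q := le_trans (by exact_mod_cast Nat.zero_le start) hb.1
    rw [PySem.List.pyRange_one_append (start : Int) q ((tl.length : Int) + 1) hb.1 (by omega),
      List.filter_append]
    have h1 : (PySem.List.pyRange (start : Int) q 1).filter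
        (fun i => decide (al <+: tl.drop i.toNat)) = [] := by
      rw [List.filter_eq_nil_iff]
      intro i hi
      rw [PySem.List.mem_pyRange_one] at hi
      simp only [decide_eq_true_eq]
      exact hmin i.toNat (by omega) (by omega)
    rw [h1, List.nil_append, PySem.List.pyRange_one_cons (by omega : q < (tl.length : Int) + 1),
      List.filter_cons_of_pos (by simpa using hpre)]
    have hcast : q + 1 = ((q.toNat + 1 : Nat) : Int) := by omega
    rw [hcast, ih (by omega)]

-- B's fused loop = A's scan loop over the filtered list
-- the slice-comparison test equals the prefix predicate
theorem pv_match_test (tl al : List Char) (n : Nat) (hn : al.length = n) (i : Int) (h0 : 0 ≤ i) :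
    (PySem.List.slice tl (some i) (some (i + (n : Int))) == al) =
      decide (al <+: tl.drop i.toNat) := by
  rw [PySem.List.slice_toNat tl h0 (by omega)]
  have ht : (i + (n : Int)).toNat - i.toNat = n := by omega
  rw [ht]
  rw [Bool.beq_eq_decide_eq]
  apply decide_eq_decide.mpr
  rw [List.prefix_iff_eq_take]
  subst hn
  exact ⟨fun h => h.symm, fun h => h.symm⟩

theorem pvLoopB_eq (text tl al : List Char) (n : Nat) (hn : al.length = n) (ts : List Char)
    (inserted : List Int) (xs : List Int) (hx : ∀ i ∈ xs, 0 ≤ i) :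
    pvLoopB text tl al n ts inserted xs =
      pvLoopA text n ts inserted
        (xs.filter (fun i => decide (al <+: tl.drop i.toNat))) := by
  induction xs with
  | nil => rfl
  | cons i rest ih =>
    have h0 : 0 ≤ i := hx i (by simp)
    have hrest : ∀ j ∈ rest, 0 ≤ j := fun j hj => hx j (by simp [hj])
    rw [pvLoopB, pv_match_test tl al n hn i h0]
    by_cases hm : al <+: tl.drop i.toNat
    · rw [List.filter_cons_of_pos (by simpa using hm)]
      rw [pvLoopA]
      by_cases hc : inserted.contains i
      · simp only [hm, decide_true, hc, Bool.not_true, Bool.and_false]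
        exact ih hrest
      · simp only [hm, decide_true, hc, Bool.not_false, Bool.and_true, if_true]
    · rw [List.filter_cons_of_neg (by simpa using hm)]
      simp only [hm, decide_false, Bool.false_and]
      exact ih hrest

-- positions past len - n + 1 never match, so B's shorter range filters to the same list
theorem pv_filter_trim (tl al : List Char) (n : Nat) (hn : al.length = n) :
    (PySem.List.pyRange 0 ((tl.length : Int) - (n : Int) + 1) 1).filter
        (fun i => decide (al <+: tl.drop i.toNat)) =
      (PySem.List.pyRange 0 ((tl.length : Int) + 1) 1).filter
        (fun i => decide (al <+: tl.drop i.toNat)) := by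
  have hlen : ∀ i : Int, al <+: tl.drop i.toNat → n ≤ tl.length - i.toNat := by
    intro i hpre
    have := hpre.length_le
    simp only [List.length_drop, hn] at this
    exact this
  by_cases hb : 0 ≤ (tl.length : Int) - (n : Int) + 1
  · rw [PySem.List.pyRange_one_append 0 ((tl.length : Int) - (n : Int) + 1)
      ((tl.length : Int) + 1) hb (by omega), List.filter_append]
    have h2 : (PySem.List.pyRange ((tl.length : Int) - (n : Int) + 1)
        ((tl.length : Int) + 1) 1).filter (fun i => decide (al <+: tl.drop i.toNat)) = [] := by
      rw [List.filter_eq_nil_iff]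
      intro i hi
      rw [PySem.List.mem_pyRange_one] at hi
      simp only [decide_eq_true_eq]
      intro hpre
      have := hlen i hpre
      omega
    rw [h2, List.append_nil]
  · rw [show PySem.List.pyRange 0 ((tl.length : Int) - (n : Int) + 1) 1 = [] from
      PySem.List.pyRange_one_eq_nil (by omega), List.filter_nil]
    symm
    rw [List.filter_eq_nil_iff]
    intro i hi
    rw [PySem.List.mem_pyRange_one] at hi
    simp only [decide_eq_true_eq]
    intro hpre
    have := hlen i hpre
    omega

theorem pv_main (text anchor ts : String) (inserted : List Int) :
    insert_at_anchor_py text anchor ts inserted = insert_at_anchor_py_alt text anchor ts inserted := by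
  simp only [insert_at_anchor_py, insert_at_anchor_py_alt]
  set tl := PySem.Chars.lower text.toList with htl
  set al := PySem.Chars.lower anchor.toList with hal
  have hLt : tl.length = text.toList.length := by rw [htl]; simp [PySem.Chars.lower]
  have hLa : al.length = anchor.toList.length := by rw [hal]; simp [PySem.Chars.lower]
  have hc := pvCollect_spec tl al 0 (by omega)
  simp only [Nat.cast_zero] at hc
  have hB : pvLoopB text.toList tl al anchor.toList.length ts.toList inserted
      (PySem.List.pyRange 0 ((text.toList.length : Int) - (anchor.toList.length : Int) + 1) 1)
      = pvLoopA text.toList anchor.toList.length ts.toList inserted (pvCollect tl al 0) := by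
    rw [pvLoopB_eq text.toList tl al anchor.toList.length hLa ts.toList inserted _
      (fun i hi => by rw [PySem.List.mem_pyRange_one] at hi; exact hi.1)]
    rw [← hLt, pv_filter_trim tl al anchor.toList.length hLa, ← hc]
  by_cases hpos : pvCollect tl al 0 = []
  · rw [if_pos hpos, hB, hpos]
    rfl
  · rw [if_neg hpos, hB]

-- ===== VERDICT (by name: the statement is the Claim_ definition above) =====
theorem insert_at_anchor_py_spec : Claim_equal_insert_at_anchor_py := by
  intro text anchor ts ins _
  unfold Spec_insert_at_anchor_py
  exact pv_main text anchor ts ins
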